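-- pv_equiv track=rewrite | github.com/krongi/content_wrangler | img_gen.py | _palette_for_tags
-- ===== SOURCE A (Python) =====
-- def _palette_for_tags(tags):
--     tags = [t.lower() for t in (tags or [])]
--     if any(t in tags for t in ("security", "ransomware", "cve", "mfa", "breach")):
--         return (18, 18, 36), (200, 30, 70)     # dark → red
--     if any(t in tags for t in ("ai", "llm", "automation", "ml")):
--         return (20, 18, 40), (120, 60, 220)    # dark → purple
--     if any(t in tags for t in ("cloud", "azure", "m365", "unifi", "dns", "network")):
--         return (10, 24, 36), (0, 160, 200)     # dark → teal
--     return (22, 22, 22), (70, 70, 70)          # neutral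
-- ===== SOURCE B (Python) =====
-- _CATEGORY = {}
-- for _i, _kws in enumerate((
--     ("security", "ransomware", "cve", "mfa", "breach"),
--     ("ai", "llm", "automation", "ml"),
--     ("cloud", "azure", "m365", "unifi", "dns", "network"),
-- )):
--     for _kw in _kws:
--         _CATEGORY[_kw] = _i
--
-- _PALETTES = (
--     ((18, 18, 36), (200, 30, 70)),
--     ((20, 18, 40), (120, 60, 220)),
--     ((10, 24, 36), (0, 160, 200)),
--     ((22, 22, 22), (70, 70, 70)),
-- )
--
--
-- def _palette_for_tags(tags):
--     best = 3
--     for t in (tags or []):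
--         c = _CATEGORY.get(t.lower(), 3)
--         if c < best:
--             best = c
--     return _PALETTES[best]
-- ===== Notes on version B (the rewrite author's own statement) =====
-- stated objective: faster
-- what changed: Inverts the search: instead of scanning each keyword group against the tag list, B makes one pass over the tags, mapping each lowercased tag through an inverted keyword-to-category-index dictionary and keeping the minimum index seen, then indexes a palette array; priority is preserved because the array order matches A's if-chain.
import Mathlib
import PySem

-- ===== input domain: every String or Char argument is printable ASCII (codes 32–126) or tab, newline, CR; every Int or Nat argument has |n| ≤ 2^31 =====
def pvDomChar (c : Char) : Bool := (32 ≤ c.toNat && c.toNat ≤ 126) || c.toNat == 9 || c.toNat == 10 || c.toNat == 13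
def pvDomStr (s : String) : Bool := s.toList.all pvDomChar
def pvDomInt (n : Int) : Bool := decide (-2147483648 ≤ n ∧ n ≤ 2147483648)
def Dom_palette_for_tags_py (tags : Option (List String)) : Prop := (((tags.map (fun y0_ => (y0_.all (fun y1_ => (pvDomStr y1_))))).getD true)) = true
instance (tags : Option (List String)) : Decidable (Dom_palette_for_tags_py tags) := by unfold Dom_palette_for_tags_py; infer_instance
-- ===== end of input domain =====

-- B inverts A's search: one pass over the tags keeping the minimum category index from an inverted keyword->index dictionary, then an array lookup (same priorities, same neutral default); objective: faster (constant factor, single pass).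


-- ===== PORT A =====
def palette_for_tags_py (tags : Option (List String)) : (Int × Int × Int) × (Int × Int × Int) :=
  let tags' := (tags.getD []).map PySem.Str.lower
  if (["security", "ransomware", "cve", "mfa", "breach"].any fun t => tags'.contains t) then
    ((18, 18, 36), (200, 30, 70))
  else if (["ai", "llm", "automation", "ml"].any fun t => tags'.contains t) then
    ((20, 18, 40), (120, 60, 220))
  else if (["cloud", "azure", "m365", "unifi", "dns", "network"].any fun t => tags'.contains t) then
    ((10, 24, 36), (0, 160, 200))
  else
    ((22, 22, 22), (70, 70, 70))

-- ===== PORT B =====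
-- the module-level inverted dictionary _CATEGORY (keyword -> category index)
def pvCategory : PySem.Dict String Int :=
  PySem.Dict.mk
    [ ("security", 0), ("ransomware", 0), ("cve", 0), ("mfa", 0), ("breach", 0),
      ("ai", 1), ("llm", 1), ("automation", 1), ("ml", 1),
      ("cloud", 2), ("azure", 2), ("m365", 2), ("unifi", 2), ("dns", 2), ("network", 2) ]

-- the module-level palette array _PALETTES
def pvPalettes4 : List ((Int × Int × Int) × (Int × Int × Int)) :=
  [ ((18, 18, 36), (200, 30, 70)),
    ((20, 18, 40), (120, 60, 220)),
    ((10, 24, 36), (0, 160, 200)),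
    ((22, 22, 22), (70, 70, 70)) ]

def palette_for_tags_py_alt (tags : Option (List String)) : (Int × Int × Int) × (Int × Int × Int) :=
  let best := (tags.getD []).foldl
    (fun b t =>
      let c := PySem.Dict.getD pvCategory (PySem.Str.lower t) 3
      if c < b then c else b) 3
  (PySem.List.pyGet? pvPalettes4 best).getD ((22, 22, 22), (70, 70, 70))

-- ===== PRECONDITION & SPEC =====
def Spec_palette_for_tags_py (tags : Option (List String)) (out : (Int × Int × Int) × (Int × Int × Int)) : Prop := out = palette_for_tags_py_alt tags
instance (tags : Option (List String)) (out : (Int × Int × Int) × (Int × Int × Int)) : Decidable (Spec_palette_for_tags_py tags out) := by unfold Spec_palette_for_tags_py; infer_instance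

-- ===== CLAIM (what is proved, stated in full; the proofs are below) =====
def Claim_equal_palette_for_tags_py : Prop := ∀ (tags : Option (List String)), Dom_palette_for_tags_py tags → Spec_palette_for_tags_py tags (palette_for_tags_py tags)

-- ===== LEMMAS AND PROOFS =====

-- the category of a lowercased tag, as a membership if-chain
theorem pv_cat_spec (t : String) :
    PySem.Dict.getD pvCategory t 3 =
      if t ∈ ["security", "ransomware", "cve", "mfa", "breach"] then 0
      else if t ∈ ["ai", "llm", "automation", "ml"] then 1
      else if t ∈ ["cloud", "azure", "m365", "unifi", "dns", "network"] then 2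
      else 3 := by
  by_cases h0 : t = "security"
  · subst h0; decide
  by_cases h1 : t = "ransomware"
  · subst h1; decide
  by_cases h2 : t = "cve"
  · subst h2; decide
  by_cases h3 : t = "mfa"
  · subst h3; decide
  by_cases h4 : t = "breach"
  · subst h4; decide
  by_cases h5 : t = "ai"
  · subst h5; decide
  by_cases h6 : t = "llm"
  · subst h6; decide
  by_cases h7 : t = "automation"
  · subst h7; decide
  by_cases h8 : t = "ml"
  · subst h8; decide
  by_cases h9 : t = "cloud"
  · subst h9; decide
  by_cases h10 : t = "azure"
  · subst h10; decide
  by_cases h11 : t = "m365"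
  · subst h11; decide
  by_cases h12 : t = "unifi"
  · subst h12; decide
  by_cases h13 : t = "dns"
  · subst h13; decide
  by_cases h14 : t = "network"
  · subst h14; decide
  simp [pvCategory, PySem.Dict.getD_eq_get?_getD, PySem.Dict.get?, h0, h1, h2, h3, h4, h5, h6, h7, h8, h9, h10, h11, h12, h13, h14, Ne.symm h0, Ne.symm h1, Ne.symm h2, Ne.symm h3, Ne.symm h4, Ne.symm h5, Ne.symm h6, Ne.symm h7, Ne.symm h8, Ne.symm h9, Ne.symm h10, Ne.symm h11, Ne.symm h12, Ne.symm h13, Ne.symm h14]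

-- B's loop body is a running minimum
theorem pv_fold_min (l : List String) (f : String → Int) (b : Int) :
    l.foldl (fun b t => if f t < b then f t else b) b = l.foldl (fun b t => min b (f t)) b := by
  induction l generalizing b with
  | nil => rfl
  | cons x xs ih => simp only [List.foldl_cons, ih]; congr 1; omega

theorem pv_foldl_min_le_iff (l : List String) (f : String → Int) (b k : Int) :
    l.foldl (fun b t => min b (f t)) b ≤ k ↔ b ≤ k ∨ ∃ t ∈ l, f t ≤ k := by
  induction l generalizing b with
  | nil => simp
  | cons x xs ih =>
    simp only [List.foldl_cons, ih, List.mem_cons]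
    constructor
    · rintro (h | ⟨t, ht, hf⟩)
      · rcases le_total b (f x) with h' | h'
        · exact Or.inl (by omega)
        · exact Or.inr ⟨x, Or.inl rfl, by omega⟩
      · exact Or.inr ⟨t, Or.inr ht, hf⟩
    · rintro (h | ⟨t, rfl | ht, hf⟩)
      · exact Or.inl (by omega)
      · exact Or.inl (by omega)
      · exact Or.inr ⟨t, ht, hf⟩

theorem pv_le_foldl_min (l : List String) (f : String → Int) (b k : Int)
    (hb : k ≤ b) (hf : ∀ t ∈ l, k ≤ f t) : k ≤ l.foldl (fun b t => min b (f t)) b := by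
  by_contra h
  rcases (pv_foldl_min_le_iff l f b (k - 1)).mp (by omega) with h' | ⟨t, ht, hf'⟩
  · omega
  · have := hf t ht; omega

-- ===== VERDICT (by name: the statement is the Claim_ definition above) =====
theorem palette_for_tags_py_spec : Claim_equal_palette_for_tags_py := by
  intro tags _
  unfold Spec_palette_for_tags_py palette_for_tags_py palette_for_tags_py_alt
  set l := tags.getD [] with hl
  simp only [pv_fold_min]
  set c : String → Int := fun t => pvCategory.getD (PySem.Str.lower t) 3 with hc
  set M := l.foldl (fun b t => min b (c t)) 3 with hM
  have hcs : ∀ t, c t =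
      if PySem.Str.lower t ∈ ["security", "ransomware", "cve", "mfa", "breach"] then 0
      else if PySem.Str.lower t ∈ ["ai", "llm", "automation", "ml"] then 1
      else if PySem.Str.lower t ∈ ["cloud", "azure", "m365", "unifi", "dns", "network"] then 2
      else 3 := fun t => pv_cat_spec (PySem.Str.lower t)
  have m0 : ∀ t, c t ≤ 0 ↔ PySem.Str.lower t ∈ ["security", "ransomware", "cve", "mfa", "breach"] := by
    intro t; rw [hcs t]; split_ifs with a b d <;> simp_all
  have m1 : ∀ t, c t ≤ 1 ↔ PySem.Str.lower t ∈ ["security", "ransomware", "cve", "mfa", "breach"] ∨ PySem.Str.lower t ∈ ["ai", "llm", "automation", "ml"] := by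
    intro t; rw [hcs t]; split_ifs with a b d <;> simp_all
  have m2 : ∀ t, c t ≤ 2 ↔
      PySem.Str.lower t ∈ ["security", "ransomware", "cve", "mfa", "breach"] ∨ PySem.Str.lower t ∈ ["ai", "llm", "automation", "ml"] ∨ PySem.Str.lower t ∈ ["cloud", "azure", "m365", "unifi", "dns", "network"] := by
    intro t; rw [hcs t]; split_ifs with a b d <;> simp_all
  have hle : ∀ k : Int, M ≤ k ↔ (3 : Int) ≤ k ∨ ∃ t ∈ l, c t ≤ k := fun k =>
    pv_foldl_min_le_iff l c 3 k
  have hM0 : 0 ≤ M := pv_le_foldl_min l c 3 0 (by omega)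
    (fun t _ => by rw [hcs t]; split_ifs <;> omega)
  have hany : ∀ g : List String,
      ((g.any fun t => (l.map PySem.Str.lower).contains t) = true ↔ ∃ t ∈ l, PySem.Str.lower t ∈ g) := by
    intro g
    simp only [List.any_eq_true, List.contains_eq_mem, decide_eq_true_eq, List.mem_map]
    constructor
    · rintro ⟨kw, hkw, t, htl, rfl⟩; exact ⟨t, htl, hkw⟩
    · rintro ⟨t, htl, hkw⟩; exact ⟨_, hkw, t, htl, rfl⟩
  by_cases x0 : ∃ t ∈ l, c t ≤ 0
  · have h0 : (["security", "ransomware", "cve", "mfa", "breach"].any fun t => (l.map PySem.Str.lower).contains t) = true :=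
      (hany _).mpr (by rcases x0 with ⟨t, ht, hct⟩; exact ⟨t, ht, (m0 t).mp hct⟩)
    have hMv : M = 0 := le_antisymm ((hle 0).mpr (Or.inr x0)) hM0
    rw [if_pos h0, hMv]; decide
  · have h0 : ¬((["security", "ransomware", "cve", "mfa", "breach"].any fun t => (l.map PySem.Str.lower).contains t) = true) :=
      fun hh => x0 (by rcases (hany _).mp hh with ⟨t, htl, htg⟩; exact ⟨t, htl, (m0 t).mpr htg⟩)
    rw [if_neg h0]
    have hge1 : 1 ≤ M := pv_le_foldl_min l c 3 1 (by omega)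
      (fun t ht => by by_contra hcon; exact x0 ⟨t, ht, by omega⟩)
    by_cases x1 : ∃ t ∈ l, c t ≤ 1
    · have h1 : (["ai", "llm", "automation", "ml"].any fun t => (l.map PySem.Str.lower).contains t) = true := by
        rcases x1 with ⟨t, ht, hct⟩
        rcases (m1 t).mp hct with hg | hg
        · exact absurd ⟨t, ht, (m0 t).mpr hg⟩ x0
        · exact (hany _).mpr ⟨t, ht, hg⟩
      have hMv : M = 1 := le_antisymm ((hle 1).mpr (Or.inr x1)) hge1
      rw [if_pos h1, hMv]; decide
    · have h1 : ¬((["ai", "llm", "automation", "ml"].any fun t => (l.map PySem.Str.lower).contains t) = true) :=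
        fun hh => x1 (by rcases (hany _).mp hh with ⟨t, htl, htg⟩; exact ⟨t, htl, (m1 t).mpr (Or.inr htg)⟩)
      rw [if_neg h1]
      have hge2 : 2 ≤ M := pv_le_foldl_min l c 3 2 (by omega)
        (fun t ht => by by_contra hcon; exact x1 ⟨t, ht, by omega⟩)
      by_cases x2 : ∃ t ∈ l, c t ≤ 2
      · have h2 : (["cloud", "azure", "m365", "unifi", "dns", "network"].any fun t => (l.map PySem.Str.lower).contains t) = true := by
          rcases x2 with ⟨t, ht, hct⟩
          rcases (m2 t).mp hct with hg | hg | hg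
          · exact absurd ⟨t, ht, (m0 t).mpr hg⟩ x0
          · exact absurd ⟨t, ht, (m1 t).mpr (Or.inr hg)⟩ x1
          · exact (hany _).mpr ⟨t, ht, hg⟩
        have hMv : M = 2 := le_antisymm ((hle 2).mpr (Or.inr x2)) hge2
        rw [if_pos h2, hMv]; decide
      · have h2 : ¬((["cloud", "azure", "m365", "unifi", "dns", "network"].any fun t => (l.map PySem.Str.lower).contains t) = true) :=
          fun hh => x2 (by rcases (hany _).mp hh with ⟨t, htl, htg⟩; exact ⟨t, htl, (m2 t).mpr (Or.inr (Or.inr htg))⟩)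
        rw [if_neg h2]
        have hge3 : 3 ≤ M := pv_le_foldl_min l c 3 3 (by omega)
          (fun t ht => by by_contra hcon; exact x2 ⟨t, ht, by omega⟩)
        have hM3 : M ≤ 3 := (hle 3).mpr (Or.inl le_rfl)
        have hMv : M = 3 := le_antisymm hM3 hge3
        rw [hMv]; decide
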